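-- pv_equiv track=rewrite | github.com/horvathnauzika/Kiv-es-lin-tetel | linearis.py | linearis
-- ===== SOURCE A (Python) =====
-- def linearis(also, felso):
--     i = also
--     while( i <= felso and (i % 10 != 0)):
--         i += 1
--     van = i <= felso
--     if van:
--         return "Van 0-ra végződő szám"
--     else:
--         return "Nincs 0-ra végződő szám"
-- ===== SOURCE B (Python) =====
-- def linearis(also, felso):
--     first = ((also + 9) // 10) * 10
--     if first <= felso:
--         return "Van 0-ra végződő szám"
--     else:
--         return "Nincs 0-ra végződő szám"
-- ===== Notes on version B (the rewrite author's own statement) =====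
-- stated objective: simpler
-- what changed: Replaces the while-loop scan for the next multiple of 10 with a closed-form computation first = ((also+9)//10)*10 compared against felso.
import Mathlib
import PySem

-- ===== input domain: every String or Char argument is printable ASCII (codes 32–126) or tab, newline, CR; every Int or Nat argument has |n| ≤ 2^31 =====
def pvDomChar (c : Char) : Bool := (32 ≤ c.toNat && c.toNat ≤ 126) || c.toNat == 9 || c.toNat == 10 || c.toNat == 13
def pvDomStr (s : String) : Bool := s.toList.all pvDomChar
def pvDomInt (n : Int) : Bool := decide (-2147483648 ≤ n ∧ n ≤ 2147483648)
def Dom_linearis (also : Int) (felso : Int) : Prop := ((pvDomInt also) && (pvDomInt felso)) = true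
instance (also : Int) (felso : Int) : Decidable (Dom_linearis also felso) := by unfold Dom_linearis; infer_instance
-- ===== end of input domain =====

-- B replaces A's while-loop scan with a closed-form first-multiple-of-10 computation (objective: simpler).

-- ===== PORT A =====
-- the while loop of A: scan i upward while i ≤ felso and i % 10 ≠ 0
def lineaisLoopA (felso : Int) (i : Int) : Int :=
  if i ≤ felso ∧ PySem.Int.mod i 10 ≠ 0 then lineaisLoopA felso (i + 1) else i
termination_by (felso + 1 - i).toNat
decreasing_by
  rename_i h
  have : i ≤ felso := h.1
  omega

def linearis (also : Int) (felso : Int) : String :=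
  let i := lineaisLoopA felso also
  let van := i ≤ felso
  if van then "Van 0-ra végződő szám" else "Nincs 0-ra végződő szám"

-- ===== PORT B =====
def linearis_alt (also : Int) (felso : Int) : String :=
  let first := (PySem.Int.floordiv (also + 9) 10) * 10
  if first ≤ felso then "Van 0-ra végződő szám" else "Nincs 0-ra végződő szám"

-- ===== PRECONDITION & SPEC =====
def Spec_linearis (also : Int) (felso : Int) (out : String) : Prop := out = linearis_alt also felso
instance (also : Int) (felso : Int) (out : String) : Decidable (Spec_linearis also felso out) := by unfold Spec_linearis; infer_instance

-- ===== CLAIM (what is proved, stated in full; the proofs are below) =====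
def Claim_equal_linearis : Prop := ∀ (also : Int) (felso : Int), Dom_linearis also felso → Spec_linearis also felso (linearis also felso)

-- ===== LEMMAS AND PROOFS =====

-- the smallest multiple of 10 that is ≥ also, as B computes it
def pvFirst (also : Int) : Int := (PySem.Int.floordiv (also + 9) 10) * 10

theorem pvFirst_bounds (also : Int) : also ≤ pvFirst also ∧ pvFirst also < also + 10 := by
  unfold pvFirst
  rw [PySem.Int.floordiv_eq_ediv_of_pos (by norm_num)]
  constructor
  · have := Int.ediv_add_emod (also + 9) 10
    have := Int.emod_lt_of_pos (also + 9) (b := 10) (by norm_num)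
    omega
  · have := Int.ediv_add_emod (also + 9) 10
    have := Int.emod_nonneg (also + 9) (b := 10) (by norm_num)
    omega

theorem pvFirst_eq_self (also : Int) (h : PySem.Int.mod also 10 = 0) : pvFirst also = also := by
  rw [PySem.Int.mod_eq_emod_of_pos (by norm_num)] at h
  unfold pvFirst
  rw [PySem.Int.floordiv_eq_ediv_of_pos (by norm_num)]
  have := Int.ediv_add_emod (also + 9) 10
  have h9 : (also + 9) % 10 = 9 := by omega
  omega

theorem pvFirst_succ (also : Int) (h : PySem.Int.mod also 10 ≠ 0) : pvFirst (also + 1) = pvFirst also := by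
  rw [PySem.Int.mod_eq_emod_of_pos (by norm_num)] at h
  unfold pvFirst
  rw [PySem.Int.floordiv_eq_ediv_of_pos (by norm_num), PySem.Int.floordiv_eq_ediv_of_pos (by norm_num)]
  have e1 := Int.ediv_add_emod (also + 9) 10
  have e2 := Int.ediv_add_emod (also + 1 + 9) 10
  have m1 := Int.emod_nonneg (also + 9) (b := 10) (by norm_num)
  have m1' := Int.emod_lt_of_pos (also + 9) (b := 10) (by norm_num)
  have m2 := Int.emod_nonneg (also + 1 + 9) (b := 10) (by norm_num)
  have m2' := Int.emod_lt_of_pos (also + 1 + 9) (b := 10) (by norm_num)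
  have ha := Int.emod_nonneg also (b := 10) (by norm_num)
  have ha' := Int.emod_lt_of_pos also (b := 10) (by norm_num)
  have e0 := Int.ediv_add_emod also 10
  omega

-- the loop result is ≤ felso iff B's first multiple is ≤ felso
theorem loopA_iff (felso : Int) : ∀ i : Int, (lineaisLoopA felso i ≤ felso ↔ pvFirst i ≤ felso) := by
  intro i
  by_cases hle : i ≤ felso
  · -- induction on (felso + 1 - i).toNat
    have H : ∀ n : Nat, ∀ i : Int, (felso + 1 - i).toNat = n → i ≤ felso →
        (lineaisLoopA felso i ≤ felso ↔ pvFirst i ≤ felso) := by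
      intro n
      induction n with
      | zero => intro i hn hi; omega
      | succ k ih =>
        intro i hn hi
        by_cases hm : PySem.Int.mod i 10 = 0
        · rw [lineaisLoopA, if_neg (fun h => h.2 hm), pvFirst_eq_self i hm]
        · rw [lineaisLoopA]
          simp only [hi, hm, ne_eq, not_false_eq_true, and_self, if_true]
          rw [← pvFirst_succ i hm]
          by_cases hi' : i + 1 ≤ felso
          · exact ih (i + 1) (by omega) hi'
          · have hbound := pvFirst_bounds (i + 1)
            rw [lineaisLoopA, if_neg (by simp [hi'])]
            omega
    exact H (felso + 1 - i).toNat i rfl hle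
  · rw [lineaisLoopA, if_neg (by simp [hle])]
    have := pvFirst_bounds i
    omega

-- ===== VERDICT (by name: the statement is the Claim_ definition above) =====
theorem linearis_spec : Claim_equal_linearis := by
  intro also felso _
  unfold Spec_linearis linearis linearis_alt
  have h := loopA_iff felso also
  by_cases hc : lineaisLoopA felso also ≤ felso
  · simp only [hc, if_true]
    rw [if_pos (by exact (h.mp hc))]
  · simp only [hc, if_false]
    rw [if_neg (by rw [← pvFirst]; exact fun hf => hc (h.mpr hf))]
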